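-- pv_equiv track=rewrite | github.com/IES-Rafael-Alberti/dawb1-2425-ejercicios-u2-danielmi5 | src/ej22_22.py | contar_pares_e_impares
-- ===== SOURCE A (Python) =====
-- def contar_pares_e_impares(num):
--     contador_pares = 0
--     contador_impares = 0
--     for i in str(num):
--         if int(i) % 2 == 0:
--             contador_pares += 1
--         else:
--             contador_impares += 1
--     return contador_pares, contador_impares
-- ===== SOURCE B (Python) =====
-- def contar_pares_e_impares(num):
--     # Pure arithmetic: recurse on num // 10, classifying the last digit by
--     # num % 2 (last decimal digit has the same parity as the number).
--     # No string conversion at all.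
--     if num < 10:
--         return (1, 0) if num % 2 == 0 else (0, 1)
--     pares, impares = contar_pares_e_impares(num // 10)
--     if num % 2 == 0:
--         return pares + 1, impares
--     return pares, impares + 1
-- ===== Notes on version B (the rewrite author's own statement) =====
-- stated objective: alternative
-- what changed: Replaces the loop over str(num) with a pure arithmetic recursion: peel off the last decimal digit with num // 10 and classify it by num % 2, so no string conversion or per-character int() parsing happens at all.
import Mathlib
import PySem

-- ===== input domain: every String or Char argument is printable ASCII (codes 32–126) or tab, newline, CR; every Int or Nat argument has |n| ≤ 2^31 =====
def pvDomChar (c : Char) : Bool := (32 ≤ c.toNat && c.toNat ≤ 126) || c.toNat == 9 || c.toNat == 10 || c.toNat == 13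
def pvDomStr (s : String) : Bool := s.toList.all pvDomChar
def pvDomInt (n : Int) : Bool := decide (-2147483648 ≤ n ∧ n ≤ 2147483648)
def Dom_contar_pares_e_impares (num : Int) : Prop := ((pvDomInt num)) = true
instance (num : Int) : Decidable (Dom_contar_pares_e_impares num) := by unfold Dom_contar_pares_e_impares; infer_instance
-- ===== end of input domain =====

-- B replaces A's loop over str(num) by a pure arithmetic recursion on num // 10,
-- classifying each last digit by num % 2 (no string conversion at all).


-- ===== PORT A =====
-- for i in str(num): int(i) % 2 == 0 → counters; int(i) is PySem.Int.ofChars? [i]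
-- (.getD 0 is only reached where int(i) raises ValueError, i.e. outside Pre_).
def contar_pares_e_impares (num : Int) : Int × Int :=
  (PySem.Int.toChars num).foldl
    (fun (acc : Int × Int) i =>
      if PySem.Int.mod ((PySem.Int.ofChars? [i]).getD 0) 2 = 0 then (acc.1 + 1, acc.2)
      else (acc.1, acc.2 + 1))
    (0, 0)

-- ===== PORT B =====
-- arithmetic recursion: peel the last decimal digit with num // 10, classify it by num % 2.
-- The Nat fuel (num.toNat + 1, strictly more than the recursion depth) only makes the
-- same recursion structural; it never changes the computed value.
def pvGo : Nat → Int → Int × Int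
  | 0, _ => (0, 0)
  | fuel + 1, num =>
    if num < 10 then
      if PySem.Int.mod num 2 = 0 then (1, 0) else (0, 1)
    else
      let pi := pvGo fuel (PySem.Int.floordiv num 10)
      if PySem.Int.mod num 2 = 0 then (pi.1 + 1, pi.2) else (pi.1, pi.2 + 1)

def contar_pares_e_impares_alt (num : Int) : Int × Int := pvGo (num.toNat + 1) num

-- ===== PRECONDITION & SPEC =====
-- Pre_ excludes negative num, on which Python's int('-') raises ValueError in A.
def Pre_contar_pares_e_impares (num : Int) : Prop := 0 ≤ num
instance (num : Int) : Decidable (Pre_contar_pares_e_impares num) := by unfold Pre_contar_pares_e_impares; infer_instance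
def pvWitness_contar_pares_e_impares : Int := 2024

def Spec_contar_pares_e_impares (num : Int) (out : Int × Int) : Prop := out = contar_pares_e_impares_alt num
instance (num : Int) (out : Int × Int) : Decidable (Spec_contar_pares_e_impares num out) := by unfold Spec_contar_pares_e_impares; infer_instance

-- ===== CLAIM (what is proved, stated in full; the proofs are below) =====
def Claim_equal_contar_pares_e_impares : Prop := ∀ (num : Int), Dom_contar_pares_e_impares num → Pre_contar_pares_e_impares num → Spec_contar_pares_e_impares num (contar_pares_e_impares num)

-- ===== LEMMAS AND PROOFS =====

-- toDigitsCore is fuel-independent once the fuel exceeds n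
theorem toDigitsCore_fuel (b : ℕ) (hb : 2 ≤ b) (f f' n : ℕ) (l : List Char)
    (h : n < f) (h' : n < f') : Nat.toDigitsCore b f n l = Nat.toDigitsCore b f' n l := by
  induction f generalizing f' n l with
  | zero => omega
  | succ f ih =>
    cases f' with
    | zero => omega
    | succ f' =>
      simp only [Nat.toDigitsCore]
      by_cases hnb : n / b = 0
      · simp [hnb]
      · have hn : 0 < n := by
          rcases Nat.eq_zero_or_pos n with h0 | h0
          · exact absurd (by simp [h0]) hnb
          · exact h0
        have hlt : n / b < n := Nat.div_lt_self hn (by omega)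
        simp only [hnb, if_false]
        exact ih f' (n / b) _ (by omega) (by omega)

-- accumulator lemma for toDigitsCore
theorem toDigitsCore_acc (b f n : ℕ) (l : List Char) :
    Nat.toDigitsCore b f n l = Nat.toDigitsCore b f n [] ++ l := by
  induction f generalizing n l with
  | zero => simp [Nat.toDigitsCore]
  | succ f ih =>
    simp only [Nat.toDigitsCore]
    by_cases hnb : n / b = 0
    · simp [hnb]
    · simp only [hnb, if_false]
      rw [ih (n / b) (Nat.digitChar (n % b) :: l), ih (n / b) [Nat.digitChar (n % b)]]
      simp

theorem toDigits_lt_ten (n : ℕ) (h : n < 10) :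
    Nat.toDigits 10 n = [Nat.digitChar n] := by
  simp [Nat.toDigits, Nat.toDigitsCore, Nat.div_eq_of_lt h, Nat.mod_eq_of_lt h]

theorem toDigits_ge_ten (n : ℕ) (h : 10 ≤ n) :
    Nat.toDigits 10 n = Nat.toDigits 10 (n / 10) ++ [Nat.digitChar (n % 10)] := by
  have hnb : n / 10 ≠ 0 := by omega
  have h1 : Nat.toDigits 10 n = Nat.toDigitsCore 10 n (n / 10) [Nat.digitChar (n % 10)] := by
    rw [Nat.toDigits, Nat.toDigitsCore, if_neg hnb]
  rw [h1, toDigitsCore_acc, Nat.toDigits, toDigitsCore_fuel 10 (by norm_num) n (n / 10 + 1)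
    (n / 10) [] (by omega) (by omega)]

-- int('d') for a single decimal digit character
theorem ofChars_digitChar (k : ℕ) (h : k < 10) :
    (PySem.Int.ofChars? [Nat.digitChar k]).getD 0 = (k : ℤ) := by
  interval_cases k <;> decide

-- PySem's % on a natural number and 2 is the natural remainder
theorem mod_two_nat (m : ℕ) : PySem.Int.mod (m : ℤ) 2 = ((m % 2 : ℕ) : ℤ) := by
  simp only [PySem.Int.mod, Int.fmod_eq_emod]
  omega

-- str of a natural number is its decimal digit list
theorem toChars_natCast (m : ℕ) : PySem.Int.toChars (m : ℤ) = Nat.toDigits 10 m := by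
  simp only [PySem.Int.toChars, Int.toNat_natCast]
  rw [if_neg (by omega)]

-- core equivalence on natural numbers, by induction on the fuel
theorem main_go (fuel : ℕ) : ∀ n : ℕ, n < fuel →
    contar_pares_e_impares (n : ℤ) = pvGo fuel (n : ℤ) := by
  induction fuel with
  | zero => intro n h; omega
  | succ fuel ih =>
    intro n hn
    have htc := toChars_natCast n
    by_cases h : n < 10
    · simp only [pvGo]
      rw [if_pos (by exact_mod_cast h)]
      unfold contar_pares_e_impares
      rw [htc, toDigits_lt_ten n h]
      simp only [List.foldl, ofChars_digitChar n h]
      split_ifs <;> simp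
    · rw [Nat.not_lt] at h
      have hdiv : PySem.Int.floordiv (n : ℤ) 10 = ((n / 10 : ℕ) : ℤ) := by
        simp only [PySem.Int.floordiv, Int.fdiv_eq_ediv]
        omega
      simp only [pvGo]
      rw [if_neg (by exact_mod_cast Nat.not_lt.mpr h), hdiv,
        ← ih (n / 10) (by omega)]
      unfold contar_pares_e_impares
      rw [htc, toDigits_ge_ten n h, List.foldl_append]
      rw [toChars_natCast (n / 10)]
      simp only [List.foldl, ofChars_digitChar (n % 10) (Nat.mod_lt n (by norm_num))]
      have hpar : (PySem.Int.mod ((n % 10 : ℕ) : ℤ) 2 = 0) ↔ (PySem.Int.mod (n : ℤ) 2 = 0) := by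
        rw [mod_two_nat, mod_two_nat]
        constructor <;> intro hx <;> omega
      by_cases hc : PySem.Int.mod (n : ℤ) 2 = 0
      · rw [if_pos (hpar.mpr hc), if_pos hc]
      · rw [if_neg (fun hx => hc (hpar.mp hx)), if_neg hc]

-- ===== VERDICT (by name: the statement is the Claim_ definition above) =====
theorem contar_pares_e_impares_spec : Claim_equal_contar_pares_e_impares := by
  intro num _ hpre
  unfold Spec_contar_pares_e_impares
  have h := Int.toNat_of_nonneg hpre
  calc contar_pares_e_impares num
      = contar_pares_e_impares ((num.toNat : ℕ) : ℤ) := by rw [h]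
    _ = pvGo (num.toNat + 1) ((num.toNat : ℕ) : ℤ) := main_go (num.toNat + 1) num.toNat (by omega)
    _ = contar_pares_e_impares_alt num := by unfold contar_pares_e_impares_alt; rw [h]
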